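-- pv_equiv track=rewrite | github.com/Shubham7204/sparkx_roadmap | roadmappp/src/roadmapgpt/utils.py | dict_to_mermaid
-- ===== SOURCE A (Python) =====
-- def dict_style_changer(file):
--     new = {}
--     count = 1
--
--     for k, v in file.items():
--         new_key = f"{count}[{k}]"
--         count += 1
--         temp = []
--
--         for i in v:
--             new_value = f"{count}[{i}]"
--             count += 1
--             temp.append(new_value)
--
--         new[new_key] = temp
--
--     return new
--
-- def dict_to_mermaid(file):
--     file = dict_style_changer(file)
--     output = "flowchart TB\n\t"
--     arrow = " --> "
--     thick_arrow = " ==> "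
--
--     for k, v in file.items():
--         output += f"subgraph {k}\n\t{arrow.join(v)}\n\tend\n\t"
--
--     output += thick_arrow.join(list(file.keys()))
--
--     return output
-- ===== SOURCE B (Python) =====
-- def dict_to_mermaid(file):
--     # Flatten all names (each key followed by its values) into one list, number
--     # them globally by 1-based position in that list, then regroup the label
--     # list by slicing; no running counter is threaded through the loop.
--     items = list(file.items())
--     flat = [name for k, v in items for name in (k, *v)]
--     labels = [f"{i}[{name}]" for i, name in enumerate(flat, 1)]
--     blocks = []
--     keys = []
--     pos = 0
--     for k, v in items:
--         keys.append(labels[pos])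
--         blocks.append(f"subgraph {labels[pos]}\n\t"
--                       + " --> ".join(labels[pos + 1:pos + 1 + len(v)])
--                       + "\n\tend\n\t")
--         pos += 1 + len(v)
--     return "flowchart TB\n\t" + "".join(blocks) + " ==> ".join(keys)
-- ===== Notes on version B (the rewrite author's own statement) =====
-- stated objective: alternative
-- what changed: B replaces A's counter-threaded renumbering pass plus two output scans by a flatten-number-regroup scheme: it flattens every key followed by its values into one list, labels each name by its global 1-based position via enumerate (no running counter), and then rebuilds each subgraph block by slicing the precomputed label list.
import Mathlib
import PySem

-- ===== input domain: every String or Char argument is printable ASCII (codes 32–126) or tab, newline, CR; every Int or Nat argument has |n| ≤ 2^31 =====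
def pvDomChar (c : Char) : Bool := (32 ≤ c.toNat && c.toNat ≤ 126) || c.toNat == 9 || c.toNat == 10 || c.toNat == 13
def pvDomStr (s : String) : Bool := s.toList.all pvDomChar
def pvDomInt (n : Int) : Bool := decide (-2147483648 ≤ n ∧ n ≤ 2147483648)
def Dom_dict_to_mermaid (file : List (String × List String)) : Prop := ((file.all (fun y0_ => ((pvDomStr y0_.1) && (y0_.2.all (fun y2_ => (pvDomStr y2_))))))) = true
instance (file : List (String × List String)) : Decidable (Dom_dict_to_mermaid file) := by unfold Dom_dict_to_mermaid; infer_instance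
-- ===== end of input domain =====

-- B replaces A's counter-threaded renumbering dict by a flatten / globally
-- number by position / regroup-by-slicing scheme (objective: alternative).

-- ===== PORT A =====
-- inner loop of dict_style_changer: numbers the values of one key, threading count
def pvInnerA : Int → List String → List String × Int
  | count, [] => ([], count)
  | count, i :: rest =>
    let new_value := PySem.Int.toStr count ++ "[" ++ i ++ "]"
    let r := pvInnerA (count + 1) rest
    (new_value :: r.1, r.2)

-- outer loop of dict_style_changer (new_key uses count, then count advances past v)
def pvDscGo : Int → List (String × List String) → List (String × List String)
  | _, [] => []
  | count, (k, v) :: rest =>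
    let new_key := PySem.Int.toStr count ++ "[" ++ k ++ "]"
    let r := pvInnerA (count + 1) v
    (new_key, r.1) :: pvDscGo r.2 rest

def dict_style_changer (file : List (String × List String)) : List (String × List String) :=
  pvDscGo 1 file

def dict_to_mermaid (file : List (String × List String)) : String :=
  let f := dict_style_changer file
  let output :=
    f.foldl (fun output kv =>
      output ++ "subgraph " ++ kv.1 ++ "\n\t" ++ PySem.Str.join " --> " kv.2 ++ "\n\tend\n\t")
      "flowchart TB\n\t"
  output ++ PySem.Str.join " ==> " (f.map Prod.fst)

-- ===== PORT B =====
-- B's loop over the items, indexing into the precomputed global label list;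
-- labels[pos] is always in range on B's inputs, so .getD "" is exact here.
def pvAltLoop : List String → Int → List (String × List String) → List String × List String
  | _, _, [] => ([], [])
  | labels, pos, (_, v) :: rest =>
    let key := (PySem.List.pyGet? labels pos).getD ""
    let vals := PySem.List.slice labels (some (pos + 1)) (some (pos + 1 + (v.length : Int)))
    let blk := "subgraph " ++ key ++ "\n\t" ++ PySem.Str.join " --> " vals ++ "\n\tend\n\t"
    let r := pvAltLoop labels (pos + 1 + (v.length : Int)) rest
    (blk :: r.1, key :: r.2)

def dict_to_mermaid_alt (file : List (String × List String)) : String :=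
  let flat := file.flatMap (fun kv => kv.1 :: kv.2)
  let labels := (PySem.List.enumerate flat 1).map
    (fun jx => PySem.Int.toStr jx.1 ++ "[" ++ jx.2 ++ "]")
  let r := pvAltLoop labels 0 file
  "flowchart TB\n\t" ++ PySem.Str.join "" r.1 ++ PySem.Str.join " ==> " r.2

-- ===== PRECONDITION & SPEC =====
def Spec_dict_to_mermaid (file : List (String × List String)) (out : String) : Prop := out = dict_to_mermaid_alt file
instance (file : List (String × List String)) (out : String) : Decidable (Spec_dict_to_mermaid file out) := by unfold Spec_dict_to_mermaid; infer_instance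

-- ===== CLAIM (what is proved, stated in full; the proofs are below) =====
def Claim_equal_dict_to_mermaid : Prop := ∀ (file : List (String × List String)), Dom_dict_to_mermaid file → Spec_dict_to_mermaid file (dict_to_mermaid file)

-- ===== LEMMAS AND PROOFS =====

-- names numbered consecutively from c (proof-side normal form of both label schemes)
def pvNumber : Int → List String → List String
  | _, [] => []
  | c, x :: r => (PySem.Int.toStr c ++ "[" ++ x ++ "]") :: pvNumber (c + 1) r

def pvFlat (file : List (String × List String)) : List String :=
  file.flatMap (fun kv => kv.1 :: kv.2)

def pvBlk (kv : String × List String) : String :=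
  "subgraph " ++ kv.1 ++ "\n\t" ++ PySem.Str.join " --> " kv.2 ++ "\n\tend\n\t"

lemma pvJoin_empty_cons (a : String) (l : List String) :
    PySem.Str.join "" (a :: l) = a ++ PySem.Str.join "" l := by
  cases l with
  | nil => simp [PySem.Str.join]
  | cons b r => simp [PySem.Str.join, PySem.Chars.join_cons_cons, String.ofList_append]

lemma pvNumber_length (v : List String) : ∀ c, (pvNumber c v).length = v.length := by
  induction v with
  | nil => intro c; simp [pvNumber]
  | cons x r ih => intro c; simp [pvNumber, ih]

lemma pvNumber_append (a b : List String) : ∀ c,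
    pvNumber c (a ++ b) = pvNumber c a ++ pvNumber (c + a.length) b := by
  induction a with
  | nil => intro c; simp [pvNumber]
  | cons x r ih =>
    intro c
    simp only [List.cons_append, pvNumber, ih (c + 1), List.length_cons,
      Nat.cast_add, Nat.cast_one]
    have hc : c + 1 + (r.length : Int) = c + ((r.length : Int) + 1) := by ring
    rw [hc]

lemma pvInnerA_eq (v : List String) : ∀ c,
    pvInnerA c v = (pvNumber c v, c + v.length) := by
  induction v with
  | nil => intro c; simp [pvInnerA, pvNumber]
  | cons x r ih =>
    intro c
    simp only [pvInnerA, pvNumber, ih (c + 1), List.length_cons]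
    simp only [Prod.mk.injEq]
    refine ⟨by simp, by push_cast; ring⟩

lemma pvEnum_number (l : List String) : ∀ c,
    (PySem.List.enumerate l c).map (fun jx => PySem.Int.toStr jx.1 ++ "[" ++ jx.2 ++ "]")
      = pvNumber c l := by
  induction l with
  | nil => intro c; simp [PySem.List.enumerate_nil, pvNumber]
  | cons x r ih =>
    intro c
    rw [PySem.List.enumerate_cons, List.map_cons, ih (c + 1)]
    rfl

lemma pvSlice_mid (pre mid post : List String) :
    PySem.List.slice (pre ++ (mid ++ post)) (some (pre.length : Int))
      (some ((pre.length : Int) + (mid.length : Int))) = mid := by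
  rw [PySem.List.slice_natCast_add, List.drop_left, List.take_left]

-- the core lemma: B's positional loop over 'pre ++ globally-numbered flat suffix'
-- produces exactly the blocks and keys of A's renumbered dict for that suffix
lemma pvAltLoop_eq (items : List (String × List String)) : ∀ (pre : List String),
    pvAltLoop (pre ++ pvNumber ((pre.length : Int) + 1) (pvFlat items)) (pre.length) items
      = ((pvDscGo ((pre.length : Int) + 1) items).map pvBlk,
         (pvDscGo ((pre.length : Int) + 1) items).map Prod.fst) := by
  induction items with
  | nil => intro pre; simp [pvAltLoop, pvDscGo]
  | cons kv rest ih =>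
    intro pre
    obtain ⟨k, v⟩ := kv
    have hflat : pvFlat ((k, v) :: rest) = k :: (v ++ pvFlat rest) := by
      simp [pvFlat]
    rw [hflat]
    simp only [pvNumber, pvNumber_append]
    set Lk := PySem.Int.toStr ((pre.length : Int) + 1) ++ "[" ++ k ++ "]" with hLk
    set pre' := pre ++ Lk :: pvNumber ((pre.length : Int) + 1 + 1) v with hpre'
    have hlen' : (pre'.length : Int) = (pre.length : Int) + 1 + (v.length : Int) := by
      simp [hpre', pvNumber_length]; ring
    have hlab : pre ++ Lk :: (pvNumber ((pre.length : Int) + 1 + 1) v ++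
        pvNumber ((pre.length : Int) + 1 + 1 + (v.length : Int)) (pvFlat rest))
        = pre' ++ pvNumber ((pre'.length : Int) + 1) (pvFlat rest) := by
      simp only [hpre', List.append_assoc, List.cons_append]
      rw [hlen']
      congr 2
      ring_nf
    rw [hlab]
    simp only [pvAltLoop]
    -- labels[pos] = Lk
    have hkey : (PySem.List.pyGet? (pre' ++ pvNumber ((pre'.length : Int) + 1) (pvFlat rest))
        (pre.length)).getD "" = Lk := by
      have : pre' ++ pvNumber ((pre'.length : Int) + 1) (pvFlat rest)
          = pre ++ Lk :: (pvNumber ((pre.length : Int) + 1 + 1) v ++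
              pvNumber ((pre'.length : Int) + 1) (pvFlat rest)) := by
        simp [hpre', List.append_assoc]
      rw [this, PySem.List.pyGet?_append_length]
      rfl
    -- the slice = the numbered values
    have hvals : PySem.List.slice (pre' ++ pvNumber ((pre'.length : Int) + 1) (pvFlat rest))
        (some ((pre.length : Int) + 1)) (some ((pre.length : Int) + 1 + (v.length : Int)))
        = pvNumber ((pre.length : Int) + 1 + 1) v := by
      have hm := pvSlice_mid (pre ++ [Lk]) (pvNumber ((pre.length : Int) + 1 + 1) v)
        (pvNumber ((pre'.length : Int) + 1) (pvFlat rest))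
      have hL1 : (((pre ++ [Lk]).length : Nat) : Int) = (pre.length : Int) + 1 := by
        simp
      have hL2 : (((pvNumber ((pre.length : Int) + 1 + 1) v).length : Nat) : Int)
          = (v.length : Int) := by simp [pvNumber_length]
      have hlist : (pre ++ [Lk]) ++ (pvNumber ((pre.length : Int) + 1 + 1) v ++
            pvNumber ((pre'.length : Int) + 1) (pvFlat rest))
          = pre' ++ pvNumber ((pre'.length : Int) + 1) (pvFlat rest) := by
        simp [hpre', List.append_assoc]
      rw [hL1, hL2, hlist] at hm
      exact hm
    rw [hkey, hvals]
    have hrec : pvAltLoop (pre' ++ pvNumber ((pre'.length : Int) + 1) (pvFlat rest))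
        ((pre.length : Int) + 1 + (v.length : Int)) rest
        = ((pvDscGo ((pre'.length : Int) + 1) rest).map pvBlk,
           (pvDscGo ((pre'.length : Int) + 1) rest).map Prod.fst) := by
      rw [← hlen']
      exact ih pre'
    rw [hrec]
    -- A side
    simp only [pvDscGo, pvInnerA_eq, List.map_cons]
    rw [hlen']
    have harith : (pre.length : Int) + 1 + (v.length : Int) + 1
        = (pre.length : Int) + 1 + 1 + (v.length : Int) := by ring
    rw [harith]
    simp [pvBlk, hLk]

lemma pvFoldA_eq (l : List (String × List String)) : ∀ (s : String),
    l.foldl (fun output kv =>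
      output ++ "subgraph " ++ kv.1 ++ "\n\t" ++ PySem.Str.join " --> " kv.2 ++ "\n\tend\n\t") s
      = s ++ PySem.Str.join "" (l.map pvBlk) := by
  induction l with
  | nil => intro s; simp [PySem.Str.join]
  | cons kv r ih =>
    intro s
    simp only [List.foldl_cons, List.map_cons, ih, pvJoin_empty_cons]
    simp [pvBlk, String.append_assoc]

-- ===== VERDICT (by name: the statement is the Claim_ definition above) =====
theorem dict_to_mermaid_spec : Claim_equal_dict_to_mermaid := by
  intro file _
  unfold Spec_dict_to_mermaid dict_to_mermaid dict_to_mermaid_alt dict_style_changer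
  simp only
  rw [pvFoldA_eq]
  have h := pvAltLoop_eq file []
  simp only [List.length_nil, Nat.cast_zero, List.nil_append, zero_add] at h
  rw [show file.flatMap (fun kv => kv.1 :: kv.2) = pvFlat file from rfl,
      pvEnum_number, h]
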